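-- pv_equiv track=rewrite | github.com/IrisVentos/bioinfo | part_2/helpers.py | calculate_skew
-- ===== SOURCE A (Python) =====
-- def calculate_skew(genome):
--     """
--     Calculate the skew values for a DNA string.
--
--     Skew_i(Genome) = difference between total G's and total C's
--     in the first i nucleotides of Genome.
--
--     Args:
--         genome (str): DNA string containing nucleotides A, T, G, C
--
--     Returns:
--         list: List of skew values from position 0 to len(genome)
--     """
--     skew_values = [0]  # Skew_0 is always 0
--     current_skew = 0
--
--     for nucleotide in genome:
--         if nucleotide == 'G':
--             current_skew += 1
--         elif nucleotide == 'C':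
--             current_skew -= 1
--         # For A and T, skew remains the same
--
--         skew_values.append(current_skew)
--
--     return skew_values
-- ===== SOURCE B (Python) =====
-- def calculate_skew(genome):
--     # Compute the final skew once via str.count, then build the list
--     # back-to-front by undoing each step while walking the string reversed.
--     total = genome.count('G') - genome.count('C')
--     skews = [total]
--     for nucleotide in reversed(genome):
--         if nucleotide == 'G':
--             total -= 1
--         elif nucleotide == 'C':
--             total += 1
--         skews.append(total)
--     skews.reverse()
--     return skews
-- ===== Notes on version B (the rewrite author's own statement) =====
-- stated objective: alternative
-- what changed: Instead of A's forward scan accumulating the skew from 0 and appending, B first computes the final skew as genome.count('G') - genome.count('C'), then reconstructs the list BACK-TO-FRONT by walking the reversed string and undoing each nucleotide's contribution, reversing the collected list at the end.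
import Mathlib
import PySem

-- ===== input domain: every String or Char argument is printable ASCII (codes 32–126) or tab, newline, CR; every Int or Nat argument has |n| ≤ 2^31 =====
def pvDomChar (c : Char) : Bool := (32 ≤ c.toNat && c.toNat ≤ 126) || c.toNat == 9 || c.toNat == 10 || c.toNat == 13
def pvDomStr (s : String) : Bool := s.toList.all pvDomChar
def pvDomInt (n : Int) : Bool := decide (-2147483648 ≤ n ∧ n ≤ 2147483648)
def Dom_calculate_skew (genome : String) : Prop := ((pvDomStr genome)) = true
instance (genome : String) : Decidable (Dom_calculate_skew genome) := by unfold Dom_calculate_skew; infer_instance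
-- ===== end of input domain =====

-- B replaces A's forward accumulate-and-append scan by: compute the final skew with str.count,
-- then rebuild the list back-to-front over the reversed string; objective: alternative.

-- ===== PORT A =====
-- the for-loop over genome, carrying (skew_values, current_skew)
def calcSkewLoop (vals : List Int) (cur : Int) : List Char → List Int
  | [] => vals
  | c :: cs =>
    let cur' := if c = 'G' then cur + 1 else if c = 'C' then cur - 1 else cur
    calcSkewLoop (vals ++ [cur']) cur' cs

def calculate_skew (genome : String) : List Int :=
  calcSkewLoop [0] 0 genome.toList

-- ===== PORT B =====
-- the for-loop over reversed(genome), carrying (skews, total)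
def skewBackLoop (skews : List Int) (total : Int) : List Char → List Int
  | [] => skews
  | c :: cs =>
    let total' := if c = 'G' then total - 1 else if c = 'C' then total + 1 else total
    skewBackLoop (skews ++ [total']) total' cs

def calculate_skew_alt (genome : String) : List Int :=
  let total : Int := (PySem.Str.count genome "G" : Int) - (PySem.Str.count genome "C" : Int)
  (skewBackLoop [total] total genome.toList.reverse).reverse

-- ===== PRECONDITION & SPEC =====
def Spec_calculate_skew (genome : String) (out : List Int) : Prop := out = calculate_skew_alt genome
instance (genome : String) (out : List Int) : Decidable (Spec_calculate_skew genome out) := by unfold Spec_calculate_skew; infer_instance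

-- ===== CLAIM =====
def Claim_equal_calculate_skew : Prop := ∀ (genome : String), Dom_calculate_skew genome → Spec_calculate_skew genome (calculate_skew genome)

-- ===== LEMMAS AND PROOFS =====

-- delta of one nucleotide
def skewDelta (c : Char) : Int := if c = 'G' then 1 else if c = 'C' then -1 else 0

def sumD (l : List Char) : Int := (l.map skewDelta).sum

-- forward accumulation (A's loop, values only)
def fwdSkew (a : Int) : List Char → List Int
  | [] => []
  | c :: cs => (a + skewDelta c) :: fwdSkew (a + skewDelta c) cs

-- backward reconstruction (B's loop, values only)
def backSkew (t : Int) : List Char → List Int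
  | [] => []
  | c :: cs => (t - skewDelta c) :: backSkew (t - skewDelta c) cs

theorem calcSkewLoop_eq (cs : List Char) (vals : List Int) (cur : Int) :
    calcSkewLoop vals cur cs = vals ++ fwdSkew cur cs := by
  induction cs generalizing vals cur with
  | nil => simp [calcSkewLoop, fwdSkew]
  | cons c cs ih =>
    simp only [calcSkewLoop, fwdSkew, ih]
    by_cases hG : c = 'G' <;> by_cases hC : c = 'C' <;>
      simp [skewDelta, hG, hC, sub_eq_add_neg]

theorem skewBackLoop_eq (cs : List Char) (skews : List Int) (t : Int) :
    skewBackLoop skews t cs = skews ++ backSkew t cs := by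
  induction cs generalizing skews t with
  | nil => simp [skewBackLoop, backSkew]
  | cons c cs ih =>
    simp only [skewBackLoop, backSkew, ih]
    by_cases hG : c = 'G' <;> by_cases hC : c = 'C' <;>
      simp [skewDelta, hG, hC, sub_eq_add_neg]

theorem backSkew_append (t : Int) (l1 l2 : List Char) :
    backSkew t (l1 ++ l2) = backSkew t l1 ++ backSkew (t - sumD l1) l2 := by
  induction l1 generalizing t with
  | nil => simp [backSkew, sumD]
  | cons c l1 ih =>
    simp only [List.cons_append, backSkew, ih, sumD, List.map_cons, List.sum_cons]
    rw [show t - skewDelta c - (List.map skewDelta l1).sum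
        = t - (skewDelta c + (List.map skewDelta l1).sum) by ring]

theorem sumD_reverse (l : List Char) : sumD l.reverse = sumD l := by
  simp [sumD]

-- the back-to-front reconstruction from a+sumD cs, reversed, is the forward list
theorem back_reverse_eq_fwd (cs : List Char) (a : Int) :
    (backSkew (a + sumD cs) cs.reverse).reverse ++ [a + sumD cs] = a :: fwdSkew a cs := by
  induction cs generalizing a with
  | nil => simp [backSkew, fwdSkew, sumD]
  | cons c cs ih =>
    have hs : sumD (c :: cs) = skewDelta c + sumD cs := by
      simp [sumD]
    rw [hs, List.reverse_cons, backSkew_append, sumD_reverse]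
    have ht : a + (skewDelta c + sumD cs) - sumD cs = a + skewDelta c := by omega
    rw [ht]
    simp only [backSkew, List.reverse_append, List.reverse_cons, List.reverse_nil,
      List.nil_append, fwdSkew]
    have hv : a + skewDelta c - skewDelta c = a := by omega
    rw [hv]
    rw [show a + (skewDelta c + sumD cs) = a + skewDelta c + sumD cs by omega]
    simp only [List.cons_append, List.nil_append]
    rw [ih (a + skewDelta c)]

-- Python's str.count with a single-character needle is the character count
theorem countGo_single (c : Char) (l : List Char) (fuel acc : Nat) (h : l.length ≤ fuel) :
    PySem.Chars.count.go [c] fuel l acc = acc + l.count c := by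
  induction l generalizing fuel acc with
  | nil => cases fuel <;> simp [PySem.Chars.count.go]
  | cons x l ih =>
    cases fuel with
    | zero => simp at h
    | succ fuel =>
      have h' : l.length ≤ fuel := by simpa using h
      by_cases hx : x = c
      · subst hx
        simp [PySem.Chars.count.go, List.isPrefixOf, ih _ _ h']
        omega
      · have : ¬ ([c].isPrefixOf (x :: l) = true) := by
          simp [List.isPrefixOf]
          intro hc; exact hx hc.symm
        simp [PySem.Chars.count.go, this, ih _ _ h', hx]

theorem chars_count_single (c : Char) (l : List Char) :
    PySem.Chars.count l [c] = l.count c := by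
  simp [PySem.Chars.count, countGo_single c l l.length 0 le_rfl]

theorem count_diff_eq_sumD (l : List Char) :
    ((l.count 'G' : Int) - (l.count 'C' : Int)) = sumD l := by
  induction l with
  | nil => simp [sumD]
  | cons c l ih =>
    by_cases hG : c = 'G' <;> by_cases hC : c = 'C' <;>
      simp_all [sumD, skewDelta] <;> omega

-- ===== VERDICT =====
theorem calculate_skew_spec : Claim_equal_calculate_skew := by
  intro genome _
  have hG : PySem.Str.count genome "G" = genome.toList.count 'G' := by
    simpa using chars_count_single 'G' genome.toList
  have hC : PySem.Str.count genome "C" = genome.toList.count 'C' := by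
    simpa using chars_count_single 'C' genome.toList
  unfold Spec_calculate_skew calculate_skew calculate_skew_alt
  simp only [hG, hC, count_diff_eq_sumD, calcSkewLoop_eq, skewBackLoop_eq]
  have h := back_reverse_eq_fwd genome.toList 0
  rw [zero_add] at h
  rw [List.reverse_append, List.reverse_singleton, h]
  rfl
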